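-- pv_equiv track=rewrite | github.com/gabriellaec/desoft-analise-exercicios | backup/user_298/ch46_2020_10_02_16_17_49_853179.py | numero_no_indice
-- ===== SOURCE A (Python) =====
-- def numero_no_indice(numeros):
--     corretos = []
--     x = 0
--     while x <= len(numeros):
--         if x in numeros:
--             if numeros[x] == numeros.index(x):
--                 corretos.append(x)
--         x += 1
--     return corretos
-- ===== SOURCE B (Python) =====
-- def numero_no_indice(numeros):
--     n = len(numeros)
--     seen = set()
--     res = []
--     for j, v in enumerate(numeros):
--         if v not in seen:
--             seen.add(v)
--             if 0 <= v < n and numeros[v] == j: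
--                 res.append(v)
--     return sorted(res)
-- ===== Notes on version B (the rewrite author's own statement) =====
-- stated objective: faster
-- what changed: A scans candidate indices 0..len, rescanning the whole list for each ('in', numeros[x], numeros.index(x)); B makes one pass over the list's values with a seen-set, collecting each first-occurrence value v at position j that satisfies 0 <= v < n and numeros[v] == j, and sorts the collected values at the end.
import Mathlib
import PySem

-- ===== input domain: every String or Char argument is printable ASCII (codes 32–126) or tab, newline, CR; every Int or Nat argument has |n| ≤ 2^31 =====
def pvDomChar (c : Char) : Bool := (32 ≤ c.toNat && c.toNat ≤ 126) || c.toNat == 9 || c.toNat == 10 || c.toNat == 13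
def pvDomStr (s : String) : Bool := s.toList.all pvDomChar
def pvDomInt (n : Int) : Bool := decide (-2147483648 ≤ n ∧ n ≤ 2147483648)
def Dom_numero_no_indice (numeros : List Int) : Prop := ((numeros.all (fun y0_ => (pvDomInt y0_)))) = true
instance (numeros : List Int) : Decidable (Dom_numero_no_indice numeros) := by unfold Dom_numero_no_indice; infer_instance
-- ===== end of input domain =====

-- B replaces A's ascending scan over candidate indices x (each with an 'in' scan, numeros[x] and
-- numeros.index(x)) by ONE pass over the list's values with a seen-set, collecting each
-- first-occurrence value that passes the check, then sorting the collected values (objective: faster).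

-- ===== PORT A =====
-- A's loop body: 'if x in numeros: if numeros[x] == numeros.index(x): corretos.append(x)'.
def pvStep (l : List Int) (corretos : List Int) (x : Int) : List Int :=
  if l.contains x then
    match PySem.List.pyGet? l x, PySem.List.index? l x with
    | some v, some i => if v = (i : Int) then corretos ++ [x] else corretos
    | _, _ => corretos   -- pyGet? = none: Python raises IndexError here; excluded by Pre_
  else corretos

-- A's while loop: x runs 0..len(numeros) INCLUSIVE, one pvStep per iteration.
def pvGoA (l : List Int) (corretos : List Int) (x : Int) : Nat → List Int
  | 0 => corretos
  | fuel + 1 => pvGoA l (pvStep l corretos x) (x + 1) fuel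

def numero_no_indice (numeros : List Int) : List Int :=
  pvGoA numeros [] 0 (numeros.length + 1)

-- ===== PORT B =====
-- B's loop over enumerate(numeros): skip already-seen values; at a first occurrence (j, v)
-- append v when 0 <= v < n and numeros[v] == j.
def pvGoB (l : List Int) (n : Int) : List (Int × Int) → PySem.Set Int → List Int → List Int
  | [], _, res => res
  | p :: rest, seen, res =>
    if PySem.Set.contains seen p.2 then pvGoB l n rest seen res
    else pvGoB l n rest (PySem.Set.add seen p.2)
      (if (decide (0 ≤ p.2) && decide (p.2 < n) && (PySem.List.pyGet? l p.2 == some p.1))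
       then res ++ [p.2] else res)

def numero_no_indice_alt (numeros : List Int) : List Int :=
  PySem.List.sorted
    (pvGoB numeros (numeros.length : Int) (PySem.List.enumerate numeros 0) PySem.Set.empty [])
    (fun x => x) false

-- ===== PRECONDITION & SPEC =====
-- Pre_ excludes exactly the inputs where A raises IndexError: its loop reaches x = len(numeros)
-- and, if that value occurs in the list, evaluates numeros[len].
def Pre_numero_no_indice (numeros : List Int) : Prop := (numeros.length : Int) ∉ numeros
instance (numeros : List Int) : Decidable (Pre_numero_no_indice numeros) := by
  unfold Pre_numero_no_indice; infer_instance

def pvWitness_numero_no_indice : List Int := [0, 3]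

def Spec_numero_no_indice (numeros : List Int) (out : List Int) : Prop := out = numero_no_indice_alt numeros
instance (numeros : List Int) (out : List Int) : Decidable (Spec_numero_no_indice numeros out) := by unfold Spec_numero_no_indice; infer_instance

-- ===== CLAIM (what is proved, stated in full; the proofs are below) =====
def Claim_equal_numero_no_indice : Prop := ∀ (numeros : List Int), Dom_numero_no_indice numeros → Pre_numero_no_indice numeros → Spec_numero_no_indice numeros (numero_no_indice numeros)

-- ===== LEMMAS AND PROOFS =====

-- The test A's loop body applies to x, as one boolean.
def pvQ (l : List Int) (x : Int) : Bool :=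
  l.contains x && (PySem.List.pyGet? l x == (PySem.List.index? l x).map (fun k : Nat => (k : Int)))

theorem pvStep_eq (l : List Int) (acc : List Int) (x : Int) :
    pvStep l acc x = if pvQ l x then acc ++ [x] else acc := by
  rw [pvStep, pvQ]
  by_cases hm : x ∈ l
  · rcases hi : PySem.List.index? l x with _ | i
    · exact absurd ((PySem.List.index?_eq_none_iff l x).1 hi) (by simpa using hm)
    · rcases hg : PySem.List.pyGet? l x with _ | v
      · simp [hm]
      · by_cases he : v = (i : Int) <;> simp [hm, he]
  · simp [by simpa using hm]

-- A's whole loop from x, with exactly len+1-x iterations left, equals the pvQ-filtered range from x.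
theorem pvGoA_eq (l : List Int) (hpre : (l.length : Int) ∉ l) :
    ∀ (fuel : Nat) (x : Int) (acc : List Int), 0 ≤ x → x + (fuel : Int) = (l.length : Int) + 1 →
    pvGoA l acc x fuel = acc ++ (PySem.List.pyRange x l.length 1).filter (pvQ l) := by
  intro fuel
  induction fuel with
  | zero =>
    intro x acc hx hfx
    rw [pvGoA, PySem.List.pyRange_one_eq_nil (by push_cast at hfx ⊢; omega)]
    simp
  | succ f ih =>
    intro x acc hx hfx
    rw [pvGoA, pvStep_eq, ih (x + 1) _ (by omega) (by push_cast at hfx ⊢; omega)]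
    by_cases hxl : x < (l.length : Int)
    · rw [PySem.List.pyRange_one_cons hxl, List.filter_cons]
      cases hb : pvQ l x <;> simp
    · have hxeq : x = (l.length : Int) := by push_cast at hfx; omega
      subst hxeq
      have hb : pvQ l ((l.length : Int)) = false := by
        rw [pvQ]; simp [by simpa using hpre]
      rw [hb, if_neg (by simp), PySem.List.pyRange_one_eq_nil le_rfl,
        PySem.List.pyRange_one_eq_nil (by omega)]

-- Shifting a first-occurrence index across a cons cell (x ≠ head) shifts the absolute start by one.
theorem pvShift (l : List Int) (n : Int) (t : List Int) (v x s : Int) (hxv : x ≠ v) :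
    (∃ j : Nat, PySem.List.index? (v :: t) x = some j ∧
      (decide (0 ≤ x) && decide (x < n) && (PySem.List.pyGet? l x == some (s + (j : Int)))) = true)
  ↔ (∃ j : Nat, PySem.List.index? t x = some j ∧
      (decide (0 ≤ x) && decide (x < n) && (PySem.List.pyGet? l x == some (s + 1 + (j : Int)))) = true) := by
  rw [PySem.List.index?_cons_of_ne _ (fun he => hxv he.symm)]
  rcases hk : PySem.List.index? t x with _ | k
  · simp
  · simp only [Option.map_some, Option.some.injEq]
    constructor
    · rintro ⟨j, hj, hc⟩
      subst hj
      exact ⟨k, rfl, by rw [show s + 1 + (k : Int) = s + ((k + 1 : Nat) : Int) by push_cast; ring]; exact hc⟩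
    · rintro ⟨j, hj, hc⟩
      subst hj
      exact ⟨k + 1, rfl, by rw [show s + ((k + 1 : Nat) : Int) = s + 1 + (k : Int) by push_cast; ring]; exact hc⟩

-- B's fold over the enumerated suffix t (absolute start s): the output is nodup, and it holds
-- exactly the old elements plus the unseen values whose first occurrence in t passes the check.
theorem pvGoB_spec (l : List Int) (n : Int) (t : List Int) :
    ∀ (s : Int) (S : PySem.Set Int) (res : List Int),
      res.Nodup → (∀ x ∈ res, x ∈ S) →
      (pvGoB l n (PySem.List.enumerate t s) S res).Nodup ∧
      (∀ x, x ∈ pvGoB l n (PySem.List.enumerate t s) S res ↔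
        (x ∈ res ∨ (x ∉ S ∧ ∃ j : Nat, PySem.List.index? t x = some j ∧
          (decide (0 ≤ x) && decide (x < n) && (PySem.List.pyGet? l x == some (s + (j : Int)))) = true))) := by
  induction t with
  | nil =>
    intro s S res hnd _
    rw [PySem.List.enumerate_nil]
    refine ⟨hnd, fun x => ?_⟩
    simp [pvGoB]
  | cons v t ih =>
    intro s S res hnd hsub
    rw [PySem.List.enumerate_cons, pvGoB]
    by_cases hv : v ∈ S
    · rw [if_pos (by simpa [PySem.Set.contains_iff] using hv)]
      obtain ⟨h1, h2⟩ := ih (s + 1) S res hnd hsub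
      refine ⟨h1, fun x => ?_⟩
      rw [h2 x]
      by_cases hxv : x = v
      · subst hxv; simp [hv]
      · rw [pvShift l n t v x s hxv]
    · rw [if_neg (by simpa [PySem.Set.contains_iff] using hv)]
      have hvres : v ∉ res := fun h => hv (hsub v h)
      set res' := (if (decide (0 ≤ v) && decide (v < n) && (PySem.List.pyGet? l v == some s))
        then res ++ [v] else res) with hres'
      have hnd' : res'.Nodup := by
        rw [hres']; split
        · exact List.Nodup.append hnd (List.nodup_singleton v)
            (by simpa [List.disjoint_singleton] using hvres)
        · exact hnd
      have hsub' : ∀ x ∈ res', x ∈ PySem.Set.add S v := by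
        intro x hx
        rw [PySem.Set.mem_add]
        rw [hres'] at hx
        split at hx
        · rcases List.mem_append.1 hx with h | h
          · exact Or.inl (hsub x h)
          · simp at h; exact Or.inr h
        · exact Or.inl (hsub x hx)
      obtain ⟨h1, h2⟩ := ih (s + 1) (PySem.Set.add S v) res' hnd' hsub'
      refine ⟨h1, fun x => ?_⟩
      rw [h2 x]
      have hmemres' : x ∈ res' ↔ x ∈ res ∨
          (x = v ∧ (decide (0 ≤ v) && decide (v < n) && (PySem.List.pyGet? l v == some s)) = true) := by
        rw [hres']; split <;> rename_i hc <;> simp [hc]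
      by_cases hxv : x = v
      · subst hxv
        rw [hmemres', PySem.List.index?_cons_self]
        simp [hv]
      · rw [hmemres', ← pvShift l n t v x s hxv]
        simp only [PySem.Set.mem_add]
        constructor
        · rintro ((h | ⟨he, _⟩) | ⟨hS, hex⟩)
          · exact Or.inl h
          · exact absurd he hxv
          · exact Or.inr ⟨fun h => hS (Or.inl h), hex⟩
        · rintro (h | ⟨hS, hex⟩)
          · exact Or.inl (Or.inl h)
          · exact Or.inr ⟨fun h => h.elim hS (fun he => hxv he), hex⟩

-- The two characterisations coincide: B's collected list is a rearrangement of A's filtered range.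
theorem pvPerm (l : List Int) :
    ((PySem.List.pyRange 0 (l.length : Int) 1).filter (pvQ l)).Perm
      (pvGoB l (l.length : Int) (PySem.List.enumerate l 0) PySem.Set.empty []) := by
  obtain ⟨hnd, hmem⟩ := pvGoB_spec l (l.length : Int) l 0 PySem.Set.empty [] List.nodup_nil
    (by intro x hx; simp at hx)
  rw [List.perm_ext_iff_of_nodup (List.Nodup.filter _ (PySem.List.nodup_pyRange_one 0 _)) hnd]
  intro x
  rw [hmem x, List.mem_filter, PySem.List.mem_pyRange_one, pvQ]
  constructor
  · rintro ⟨⟨hx0, hxn⟩, hb⟩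
    simp only [Bool.and_eq_true] at hb
    obtain ⟨hcont, hget⟩ := hb
    rcases hi : PySem.List.index? l x with _ | i
    · exact absurd ((PySem.List.index?_eq_none_iff l x).1 hi) (by simpa using hcont)
    · rw [hi] at hget
      simp only [Option.map_some] at hget
      refine Or.inr ⟨by simp [PySem.Set.empty], i, rfl, ?_⟩
      simp only [zero_add, Bool.and_eq_true]
      exact ⟨⟨by simp [hx0], by simp [hxn]⟩, hget⟩
  · rintro (h | ⟨_, j, hj, hc⟩)
    · simp at h
    · simp only [Bool.and_eq_true, decide_eq_true_eq, beq_iff_eq] at hc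
      obtain ⟨⟨hx0, hxn⟩, hget⟩ := hc
      have hmx : x ∈ l := (PySem.List.index?_isSome_iff l x).1 (by rw [hj]; rfl)
      refine ⟨⟨hx0, hxn⟩, ?_⟩
      simp only [Bool.and_eq_true]
      exact ⟨by simpa using hmx, by rw [hj]; simp [hget]⟩

-- ===== VERDICT (by name: the statement is the Claim_ definition above) =====
theorem numero_no_indice_spec : Claim_equal_numero_no_indice := by
  intro numeros _ hpre
  unfold Spec_numero_no_indice numero_no_indice numero_no_indice_alt
  rw [pvGoA_eq numeros hpre (numeros.length + 1) 0 [] le_rfl (by push_cast; ring), List.nil_append]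
  exact (PySem.List.sorted_eq_of_perm_of_pairwise_lt _ _ (fun x => x) (pvPerm numeros)
    (List.Pairwise.filter _ (PySem.List.pairwise_lt_pyRange_one 0 _))).symm
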